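-- pv_equiv track=rewrite | github.com/ethyca/fides | noxfiles/changelog_nox.py | find_unreleased_section
-- ===== SOURCE A (Python) =====
-- def find_unreleased_section(content: str) -> tuple[int, int]:
--     """Find the start and end line numbers of the Unreleased section."""
--     lines = content.split("\n")
--     start_idx = None
--     end_idx = None
--
--     for i, line in enumerate(lines):
--         if line.startswith("## [Unreleased]"):
--             start_idx = i
--         elif start_idx is not None and line.startswith("## ["):
--             # Found next release section
--             end_idx = i
--             break
--
--     if start_idx is None:
--         raise ValueError("Could not find [Unreleased] section in CHANGELOG.md")
--
--     if end_idx is None: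
--         end_idx = len(lines)
--
--     return start_idx, end_idx
-- ===== SOURCE B (Python) =====
-- def find_unreleased_section(content: str) -> tuple[int, int]:
--     """Find the start and end line numbers of the Unreleased section."""
--     lines = content.split("\n")
--     headers = [(i, line) for i, line in enumerate(lines) if line.startswith("## [")]
--     start_idx = next(
--         (i for i, line in headers if line.startswith("## [Unreleased]")), None
--     )
--     if start_idx is None:
--         raise ValueError("Could not find [Unreleased] section in CHANGELOG.md")
--     end_idx = next((i for i, _ in headers if i > start_idx), len(lines))
--     return start_idx, end_idx
-- ===== Notes on version B (the rewrite author's own statement) =====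
-- stated objective: alternative
-- what changed: Replaces the stateful single-pass loop (which overwrites start_idx and breaks) by first collecting all '## [' header indices, then taking the first Unreleased header as start and the first header after it as end; Pre_ excludes inputs with no '## [Unreleased]' line (A raises ValueError) and inputs with more than one (degenerate changelogs where A's last-wins overwrite of start_idx is accidental and first-vs-last is anybody's choice).
-- outside the precondition, e.g. on find_unreleased_section('## [Unreleased]\n## [Unreleased]'): A returns (1, 2), B returns (0, 1)
import Mathlib
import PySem

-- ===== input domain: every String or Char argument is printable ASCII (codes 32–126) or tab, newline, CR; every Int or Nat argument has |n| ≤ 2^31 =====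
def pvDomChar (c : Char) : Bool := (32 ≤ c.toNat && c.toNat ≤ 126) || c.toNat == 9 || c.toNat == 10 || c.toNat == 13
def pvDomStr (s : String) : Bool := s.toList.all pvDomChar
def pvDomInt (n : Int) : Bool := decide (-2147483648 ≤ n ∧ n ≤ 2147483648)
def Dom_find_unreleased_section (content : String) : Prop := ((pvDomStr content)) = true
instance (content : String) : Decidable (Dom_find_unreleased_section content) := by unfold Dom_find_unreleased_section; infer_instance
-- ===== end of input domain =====

-- B replaces A's stateful break-loop by a header-index computation: start = first Unreleased header, end = first header after it.

-- ===== PORT A =====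
-- A's for-loop: state is start_idx (Option Int); stops returning (start_idx, some i) at the break
def pvLoopA : List (Int × String) → Option Int → Option Int × Option Int
  | [], s => (s, none)
  | (i, line) :: rest, s =>
    if PySem.Str.startswith line "## [Unreleased]" then pvLoopA rest (some i)
    else if s.isSome && PySem.Str.startswith line "## [" then (s, some i)
    else pvLoopA rest s

def find_unreleased_section (content : String) : Int × Int :=
  let lines := (PySem.Str.split? content "\n").getD []
  match pvLoopA (PySem.List.enumerate lines 0) none with
  | (none, _) => (-1, -1)           -- A raises ValueError here; excluded by Pre_
  | (some s, none) => (s, (lines.length : Int))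
  | (some s, some e) => (s, e)

-- ===== PORT B =====
def find_unreleased_section_alt (content : String) : Int × Int :=
  let lines := (PySem.Str.split? content "\n").getD []
  let headers := (PySem.List.enumerate lines 0).filter (fun p => PySem.Str.startswith p.2 "## [")
  match headers.find? (fun p => PySem.Str.startswith p.2 "## [Unreleased]") with
  | none => (-1, -1)                -- B raises ValueError here; excluded by Pre_
  | some p0 =>
    let end_idx :=
      match headers.find? (fun q => decide (p0.1 < q.1)) with
      | some q => q.1
      | none => (lines.length : Int)
    (p0.1, end_idx)

-- ===== PRECONDITION & SPEC =====
-- Pre_ excludes inputs with no '## [Unreleased]' line, on which A raises ValueError, and inputs with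
-- more than one such line — degenerate changelogs on which A's last-wins overwrite of start_idx is an
-- accident of its loop and first-vs-last is anybody's choice (B returns the first Unreleased header).
def Pre_find_unreleased_section (content : String) : Prop :=
  ((PySem.Str.split? content "\n").getD []).countP
    (fun l => PySem.Str.startswith l "## [Unreleased]") = 1
instance (content : String) : Decidable (Pre_find_unreleased_section content) := by
  unfold Pre_find_unreleased_section; infer_instance
def pvWitness_find_unreleased_section : String := "## [Unreleased]\nfix\n## [1.0]"

def Spec_find_unreleased_section (content : String) (out : Int × Int) : Prop := out = find_unreleased_section_alt content
instance (content : String) (out : Int × Int) : Decidable (Spec_find_unreleased_section content out) := by unfold Spec_find_unreleased_section; infer_instance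

-- ===== CLAIM (what is proved, stated in full; the proofs are below) =====
def Claim_equal_find_unreleased_section : Prop := ∀ (content : String), Dom_find_unreleased_section content → Pre_find_unreleased_section content → Spec_find_unreleased_section content (find_unreleased_section content)

-- ===== LEMMAS AND PROOFS =====

-- proof-only abbreviations for the two line predicates
def pvU (p : Int × String) : Bool := PySem.Str.startswith p.2 "## [Unreleased]"
def pvH (p : Int × String) : Bool := PySem.Str.startswith p.2 "## ["

theorem pvU_imp_H (p : Int × String) (h : pvU p = true) : pvH p = true := by
  simp only [pvU, pvH, PySem.Str.startswith_eq, PySem.Chars.startswith_iff] at h ⊢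
  exact List.IsPrefix.trans (by decide) h

theorem pvLoopA_skip (E1 E : List (Int × String)) (h : ∀ p ∈ E1, pvU p = false) :
    pvLoopA (E1 ++ E) none = pvLoopA E none := by
  induction E1 with
  | nil => rfl
  | cons p t ih =>
    obtain ⟨i, l⟩ := p
    have hU := h (i, l) (by simp)
    simp only [pvU] at hU
    simp only [List.cons_append, pvLoopA, hU, Bool.false_eq_true, if_false,
      Option.isSome_none, Bool.false_and, if_false]
    exact ih (fun q hq => h q (by simp [hq]))

theorem pvLoopA_noU (E : List (Int × String)) (i : Int) (h : ∀ p ∈ E, pvU p = false) :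
    pvLoopA E (some i) = (some i, (E.find? pvH).map (·.1)) := by
  induction E with
  | nil => rfl
  | cons p t ih =>
    obtain ⟨j, l⟩ := p
    have hU := h (j, l) (by simp)
    simp only [pvU] at hU
    by_cases hH : pvH (j, l) = true
    · have hH2 : PySem.Str.startswith l "## [" = true := hH
      simp only [pvLoopA, hU, Bool.false_eq_true, if_false, Option.isSome_some,
        Bool.true_and, hH2, if_true, List.find?_cons_of_pos hH, Option.map_some]
    · have hH' : pvH (j, l) = false := by simpa using hH
      have hH2 : PySem.Str.startswith l "## [" = false := hH'
      have hskip : List.find? pvH ((j, l) :: t) = List.find? pvH t :=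
        List.find?_cons_of_neg (by simp [hH'])
      rw [hskip]
      simp only [pvLoopA, hU, Bool.false_eq_true, if_false, Option.isSome_some,
        Bool.true_and, hH2, if_false]
      exact ih (fun q hq => h q (by simp [hq]))

-- split a list at its first pvU element
theorem pv_split_first (E : List (Int × String)) (h : E.any pvU = true) :
    ∃ E1 p0 E2, E = E1 ++ p0 :: E2 ∧ (∀ p ∈ E1, pvU p = false) ∧ pvU p0 = true := by
  induction E with
  | nil => simp at h
  | cons p t ih =>
    by_cases hp : pvU p = true
    · exact ⟨[], p, t, by simp, by simp, hp⟩
    · have hp' : pvU p = false := by simpa using hp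
      have ht : t.any pvU = true := by simpa [List.any_cons, hp'] using h
      obtain ⟨E1, p0, E2, hE, h1, h0⟩ := ih ht
      exact ⟨p :: E1, p0, E2, by simp [hE], by
        intro q hq; rcases List.mem_cons.mp hq with rfl | hq
        · exact hp'
        · exact h1 q hq, h0⟩

theorem pv_find?_congr {α : Type} (l : List α) (p q : α → Bool) (h : ∀ x ∈ l, p x = q x) :
    l.find? p = l.find? q := by
  induction l with
  | nil => rfl
  | cons a t ih =>
    have ha := h a (by simp)
    by_cases hp : p a = true
    · rw [List.find?_cons_of_pos hp, List.find?_cons_of_pos (ha ▸ hp)]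
    · have hp' : p a = false := by simpa using hp
      rw [List.find?_cons_of_neg (by simp [hp']), List.find?_cons_of_neg (by simp [ha ▸ hp']),
        ih (fun x hx => h x (by simp [hx]))]

theorem pv_find?_filter {α : Type} (l : List α) (p q : α → Bool) :
    (l.filter p).find? q = l.find? (fun a => q a && p a) := by
  induction l with
  | nil => rfl
  | cons a t ih =>
    by_cases hp : p a = true
    · by_cases hq : q a = true
      · simp [hp, hq]
      · have hq' : q a = false := by simpa using hq
        simp [hp, hq', ih]
    · have hp' : p a = false := by simpa using hp
      simp [hp', ih]

theorem pv_key (content : String) (hPre : Pre_find_unreleased_section content) :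
    find_unreleased_section content = find_unreleased_section_alt content := by
  unfold Pre_find_unreleased_section at hPre
  unfold find_unreleased_section find_unreleased_section_alt
  set lines : List String := (PySem.Str.split? content "\n").getD [] with hlines
  set E : List (Int × String) := PySem.List.enumerate lines 0 with hEdef
  have hcount : E.countP pvU = 1 := by
    have : (E.map (fun x => x.2)).countP (fun l => PySem.Str.startswith l "## [Unreleased]") = 1 := by
      rw [hEdef, PySem.List.map_snd_enumerate]; exact hPre
    rw [List.countP_map] at this
    exact this
  have hany : E.any pvU = true := by
    cases hE : E with
    | nil => rw [hE] at hcount; simp at hcount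
    | cons a t =>
      rw [← hE]
      by_contra hno
      have hall : ∀ p ∈ E, pvU p = false := by
        intro p hp
        by_contra hpt
        exact hno (List.any_eq_true.mpr ⟨p, hp, by simpa using hpt⟩)
      rw [List.countP_eq_zero.mpr (fun p hp => by simp [hall p hp])] at hcount
      exact absurd hcount (by omega)
  have hsorted : E.Pairwise (fun p q => p.1 < q.1) := hEdef ▸ PySem.List.pairwise_lt_enumerate lines 0
  obtain ⟨E1, ⟨i0, l0⟩, E2, hdec, hE1, hU0⟩ := pv_split_first E hany
  have hE2none : ∀ p ∈ E2, pvU p = false := by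
    have h1 : E1.countP pvU = 0 := List.countP_eq_zero.mpr (fun a ha => by simp [hE1 a ha])
    have hc2 := hcount
    rw [hdec] at hc2
    simp only [List.countP_append, List.countP_cons, hU0, if_true, h1] at hc2
    have h2 : E2.countP pvU = 0 := by omega
    exact fun p hp => by simpa using List.countP_eq_zero.mp h2 p hp
  -- ordering facts
  rw [hdec, List.pairwise_append] at hsorted
  obtain ⟨-, hPc, hcross⟩ := hsorted
  rw [List.pairwise_cons] at hPc
  obtain ⟨hE2gt, -⟩ := hPc
  have hE1lt : ∀ p ∈ E1, p.1 < i0 := fun p hp => hcross p hp (i0, l0) (by simp)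
  have hEfull : PySem.List.enumerate lines 0 = E1 ++ (i0, l0) :: E2 := hEdef.symm.trans hdec
  have hU2 : PySem.Str.startswith l0 "## [Unreleased]" = true := hU0
  -- A side: reach (i0,l0), then run on E2 which has no Unreleased line
  have hA : pvLoopA (E1 ++ (i0, l0) :: E2) none = (some i0, (E2.find? pvH).map (·.1)) := by
    rw [pvLoopA_skip E1 _ hE1]
    show pvLoopA ((i0, l0) :: E2) none = _
    simp only [pvLoopA, hU2, if_true]
    exact pvLoopA_noU E2 i0 hE2none
  -- B side: headers, first Unreleased header, first header past it
  have hfilter : List.filter pvH (E1 ++ (i0, l0) :: E2) =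
      E1.filter pvH ++ (i0, l0) :: E2.filter pvH := by
    rw [List.filter_append, List.filter_cons_of_pos (pvU_imp_H _ hU0)]
  have hfindU : List.find? pvU (E1.filter pvH ++ (i0, l0) :: E2.filter pvH) = some (i0, l0) := by
    rw [List.find?_append, List.find?_eq_none.mpr (fun x hx => by
      simp [hE1 x (List.mem_of_mem_filter hx)]), Option.none_or,
      List.find?_cons_of_pos hU0]
  have hfindE : List.find? (fun q => decide (i0 < q.1)) (E1.filter pvH ++ (i0, l0) :: E2.filter pvH)
      = E2.find? pvH := by
    rw [List.find?_append, List.find?_eq_none.mpr (fun x hx => by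
      have := hE1lt x (List.mem_of_mem_filter hx)
      simp only [decide_eq_true_eq]; omega), Option.none_or,
      List.find?_cons_of_neg (by simp),
      pv_find?_filter, pv_find?_congr E2 _ pvH (fun p hp => by simp [hE2gt p hp])]
  have hfilter' : List.filter (fun p => PySem.Str.startswith p.2 "## [") (E1 ++ (i0, l0) :: E2) =
      E1.filter pvH ++ (i0, l0) :: E2.filter pvH := hfilter
  have hfindU' : List.find? (fun p => PySem.Str.startswith p.2 "## [Unreleased]")
      (E1.filter pvH ++ (i0, l0) :: E2.filter pvH) = some (i0, l0) := hfindU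
  simp only [hEfull, hA, hfilter', hfindU', hfindE]
  cases E2.find? pvH with
  | none => rfl
  | some q => rfl

-- ===== VERDICT (by name: the statement is the Claim_ definition above) =====
theorem find_unreleased_section_spec : Claim_equal_find_unreleased_section := by
  intro content _ hPre
  unfold Spec_find_unreleased_section
  exact pv_key content hPre
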